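-- pv_equiv track=rewrite | github.com/Harsha-Vardan/CCN-DNS | dns_resolver/dnssec.py | get_dnssec_info
-- ===== SOURCE A (Python) =====
-- def get_dnssec_info(response):
--     """
--     Extracts DNSSEC information from the response.
--     """
--     info = {
--         'has_rrsig': False,
--         'has_ds': False,
--         'has_dnskey': False
--     }
--
--     for section in ['answers', 'authorities', 'additionals']:
--         for record in response.get(section, []):
--             if record['type'] == 46: # RRSIG
--                 info['has_rrsig'] = True
--             elif record['type'] == 43: # DS
--                 info['has_ds'] = True
--             elif record['type'] == 48: # DNSKEY
--                 info['has_dnskey'] = True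
--
--     return info
-- ===== SOURCE B (Python) =====
-- def get_dnssec_info(response):
--     records = [record
--                for section in ('answers', 'authorities', 'additionals')
--                for record in response.get(section, [])]
--     return {name: any(record['type'] == code for record in records)
--             for name, code in (('has_rrsig', 46), ('has_ds', 43), ('has_dnskey', 48))}
-- ===== Notes on version B (the rewrite author's own statement) =====
-- stated objective: simpler
-- what changed: A makes one fused pass mutating three flags with an if/elif chain; B first flattens the three sections into one record list and then builds the result with a table-driven comprehension running a separate any() scan per flag (staged passes instead of a single fused pass).
import Mathlib
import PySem

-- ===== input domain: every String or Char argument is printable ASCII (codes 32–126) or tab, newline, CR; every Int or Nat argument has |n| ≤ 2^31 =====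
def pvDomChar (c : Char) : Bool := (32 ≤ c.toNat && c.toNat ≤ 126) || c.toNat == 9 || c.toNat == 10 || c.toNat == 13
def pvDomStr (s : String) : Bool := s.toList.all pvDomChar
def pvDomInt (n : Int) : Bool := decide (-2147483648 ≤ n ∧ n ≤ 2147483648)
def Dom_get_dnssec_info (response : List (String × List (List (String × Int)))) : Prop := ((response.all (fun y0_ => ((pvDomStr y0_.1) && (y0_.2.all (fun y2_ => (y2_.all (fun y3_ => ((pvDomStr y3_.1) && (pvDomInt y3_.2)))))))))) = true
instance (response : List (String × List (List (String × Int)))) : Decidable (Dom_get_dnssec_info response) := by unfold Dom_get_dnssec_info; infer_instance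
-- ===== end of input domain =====

-- B flattens the three sections into one record list and answers each flag by its own
-- table-driven any() scan, instead of A's single fused pass mutating three flags (objective: simpler).

-- ===== PORT A =====
def get_dnssec_info (response : List (String × List (List (String × Int)))) : List (String × Bool) :=
  let info : PySem.Dict String Bool :=
    PySem.Dict.mk [("has_rrsig", false), ("has_ds", false), ("has_dnskey", false)]
  let info := (["answers", "authorities", "additionals"] : List String).foldl (fun info sect =>
    ((PySem.Dict.mk response).getD sect []).foldl (fun info record =>
      -- record['type']: a missing "type" key is a KeyError, excluded by Pre_; the default 0 is never used there
      let t := (PySem.Dict.mk record).getD "type" (0 : Int)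
      if t == 46 then PySem.Dict.insert info "has_rrsig" true
      else if t == 43 then PySem.Dict.insert info "has_ds" true
      else if t == 48 then PySem.Dict.insert info "has_dnskey" true
      else info) info) info
  info.items

-- ===== PORT B =====
def get_dnssec_info_alt (response : List (String × List (List (String × Int)))) : List (String × Bool) :=
  let records : List (List (String × Int)) :=
    (["answers", "authorities", "additionals"] : List String).foldl (fun acc sect =>
      acc ++ (PySem.Dict.mk response).getD sect []) []
  ([("has_rrsig", (46 : Int)), ("has_ds", 43), ("has_dnskey", 48)]).map (fun nc =>
    -- record['type']: same KeyError spot as in A, excluded by Pre_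
    (nc.1, records.any (fun record => (PySem.Dict.mk record).getD "type" (0 : Int) == nc.2)))

-- ===== PRECONDITION & SPEC =====
-- Pre_ excludes exactly the inputs where A raises KeyError: a record in one of the three
-- scanned sections without a "type" key.
def Pre_get_dnssec_info (response : List (String × List (List (String × Int)))) : Prop :=
  ((["answers", "authorities", "additionals"] : List String).all (fun sect =>
    ((PySem.Dict.mk response).getD sect []).all (fun record =>
      record.any (fun kv => kv.1 == "type")))) = true
instance (response : List (String × List (List (String × Int)))) : Decidable (Pre_get_dnssec_info response) := by unfold Pre_get_dnssec_info; infer_instance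
def pvWitness_get_dnssec_info : (List (String × List (List (String × Int)))) :=
  [("answers", [[("type", 46)], [("type", 1)]]), ("additionals", [[("type", 48), ("ttl", 300)]])]
def Spec_get_dnssec_info (response : List (String × List (List (String × Int)))) (out : List (String × Bool)) : Prop := out = get_dnssec_info_alt response
instance (response : List (String × List (List (String × Int)))) (out : List (String × Bool)) : Decidable (Spec_get_dnssec_info response out) := by unfold Spec_get_dnssec_info; infer_instance

-- ===== CLAIM (what is proved, stated in full; the proofs are below) =====
def Claim_equal_get_dnssec_info : Prop := ∀ (response : List (String × List (List (String × Int)))), Dom_get_dnssec_info response → Pre_get_dnssec_info response → Spec_get_dnssec_info response (get_dnssec_info response)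

-- ===== LEMMAS AND PROOFS =====

-- One step of A's loop on the three-key dict: each flag just ORs its (mutually exclusive) test.
lemma stepA (r d k : Bool) (record : List (String × Int)) :
    (let t := (PySem.Dict.mk record).getD "type" (0 : Int)
     if t == 46 then PySem.Dict.insert (PySem.Dict.mk [("has_rrsig", r), ("has_ds", d), ("has_dnskey", k)]) "has_rrsig" true
     else if t == 43 then PySem.Dict.insert (PySem.Dict.mk [("has_rrsig", r), ("has_ds", d), ("has_dnskey", k)]) "has_ds" true
     else if t == 48 then PySem.Dict.insert (PySem.Dict.mk [("has_rrsig", r), ("has_ds", d), ("has_dnskey", k)]) "has_dnskey" true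
     else PySem.Dict.mk [("has_rrsig", r), ("has_ds", d), ("has_dnskey", k)]) =
    PySem.Dict.mk [("has_rrsig", r || ((PySem.Dict.mk record).getD "type" (0 : Int) == 46)),
                   ("has_ds", d || ((PySem.Dict.mk record).getD "type" (0 : Int) == 43)),
                   ("has_dnskey", k || ((PySem.Dict.mk record).getD "type" (0 : Int) == 48))] := by
  by_cases h46 : (PySem.Dict.mk record).getD "type" (0 : Int) = 46
  · simp [h46, PySem.Dict.insert]
  · by_cases h43 : (PySem.Dict.mk record).getD "type" (0 : Int) = 43
    · simp [h43, PySem.Dict.insert]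
    · by_cases h48 : (PySem.Dict.mk record).getD "type" (0 : Int) = 48
      · simp [h48, PySem.Dict.insert]
      · simp [h46, h43, h48]

-- A's whole loop keeps the dict in its three-key shape and ORs the flags across the records.
lemma foldA (recs : List (List (String × Int))) (r d k : Bool) :
    recs.foldl (fun info record =>
      let t := (PySem.Dict.mk record).getD "type" (0 : Int)
      if t == 46 then PySem.Dict.insert info "has_rrsig" true
      else if t == 43 then PySem.Dict.insert info "has_ds" true
      else if t == 48 then PySem.Dict.insert info "has_dnskey" true
      else info) (PySem.Dict.mk [("has_rrsig", r), ("has_ds", d), ("has_dnskey", k)]) =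
    PySem.Dict.mk
      [("has_rrsig", r || recs.any (fun x => (PySem.Dict.mk x).getD "type" (0 : Int) == 46)),
       ("has_ds", d || recs.any (fun x => (PySem.Dict.mk x).getD "type" (0 : Int) == 43)),
       ("has_dnskey", k || recs.any (fun x => (PySem.Dict.mk x).getD "type" (0 : Int) == 48))] := by
  induction recs generalizing r d k with
  | nil => simp
  | cons h tl ih =>
    simp only [List.foldl_cons, List.any_cons]
    rw [show (let t := (PySem.Dict.mk h).getD "type" (0 : Int)
          if t == 46 then PySem.Dict.insert (PySem.Dict.mk [("has_rrsig", r), ("has_ds", d), ("has_dnskey", k)]) "has_rrsig" true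
          else if t == 43 then PySem.Dict.insert (PySem.Dict.mk [("has_rrsig", r), ("has_ds", d), ("has_dnskey", k)]) "has_ds" true
          else if t == 48 then PySem.Dict.insert (PySem.Dict.mk [("has_rrsig", r), ("has_ds", d), ("has_dnskey", k)]) "has_dnskey" true
          else PySem.Dict.mk [("has_rrsig", r), ("has_ds", d), ("has_dnskey", k)]) =
        PySem.Dict.mk [("has_rrsig", r || ((PySem.Dict.mk h).getD "type" (0 : Int) == 46)),
                       ("has_ds", d || ((PySem.Dict.mk h).getD "type" (0 : Int) == 43)),
                       ("has_dnskey", k || ((PySem.Dict.mk h).getD "type" (0 : Int) == 48))] from stepA r d k h]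
    rw [ih]
    simp [Bool.or_assoc]

-- ===== VERDICT (by name: the statement is the Claim_ definition above) =====
theorem get_dnssec_info_spec : Claim_equal_get_dnssec_info := by
  intro response _ _
  unfold Spec_get_dnssec_info get_dnssec_info get_dnssec_info_alt
  simp only [List.foldl_cons, List.foldl_nil, foldA]
  simp [List.any_append, Bool.or_assoc]
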